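-- pv_equiv track=rewrite | github.com/AliceInWonderland61/spring2025-python | Week3/week-3-S2-P2.py | count_balanced_terrain_subsections
-- ===== SOURCE A (Python) =====
-- def count_balanced_terrain_subsections(terrain):
--     prev_group=0
--     curr_group=1
--     count=0
--
--     for i in range(1, len(terrain)):
--         if terrain[i]==terrain[i-1]: #if the current character is the same as the previous one we just increase the current group count
--             curr_group+=1
--         else: #if it's different then we have a new group so we set the previous group to be the current group and reset the current group to 1
--             prev_group=curr_group
--             curr_group=1
--
--         if prev_group>=curr_group: #if the previous group is greater than or equal to the current group then we can form a balanced subsection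
--             count+=1
--     return count
-- ===== SOURCE B (Python) =====
-- def count_balanced_terrain_subsections(terrain):
--     # pass 1: run-length encode the terrain into group lengths
--     groups = []
--     run = 0
--     prev = None
--     for ch in terrain:
--         if run and ch == prev:
--             run += 1
--         else:
--             if run:
--                 groups.append(run)
--             run = 1
--             prev = ch
--     if run:
--         groups.append(run)
--     # pass 2: sum of min over adjacent group lengths
--     return sum(min(a, b) for a, b in zip(groups, groups[1:]))
-- ===== Notes on version B (the rewrite author's own statement) =====
-- stated objective: alternative
-- what changed: A counts balanced steps inside one stateful index loop; B first builds the run-length encoding of the terrain and then sums min(prev_run, curr_run) over adjacent run lengths in a second pass.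
import Mathlib
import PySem

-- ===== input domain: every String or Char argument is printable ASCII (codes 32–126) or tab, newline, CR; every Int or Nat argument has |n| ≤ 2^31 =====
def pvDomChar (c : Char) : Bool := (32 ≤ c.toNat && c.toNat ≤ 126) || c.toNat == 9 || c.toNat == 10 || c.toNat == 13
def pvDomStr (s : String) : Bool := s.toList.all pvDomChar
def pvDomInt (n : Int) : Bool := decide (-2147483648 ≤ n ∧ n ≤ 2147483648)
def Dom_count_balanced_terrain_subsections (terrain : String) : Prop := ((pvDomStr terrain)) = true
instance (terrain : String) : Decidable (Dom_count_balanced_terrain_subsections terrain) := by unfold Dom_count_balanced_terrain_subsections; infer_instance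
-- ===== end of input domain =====

-- B replaces A's single stateful index loop by a two-pass decomposition:
-- run-length encode the terrain, then sum min over adjacent run lengths (objective: alternative).


-- ===== PORT A =====
-- A's loop 'for i in range(1, len(terrain))' compares terrain[i] with terrain[i-1];
-- ported as a structural recursion carrying the previous character and the same
-- (prev_group, curr_group, count) state, one call per loop iteration.
def loopA : Char → Int → Int → Int → List Char → Int
  | _, _, _, count, [] => count
  | p, prevg, currg, count, c :: rest =>
    let st := if c == p then (prevg, currg + 1) else (currg, 1)
    let count' := if st.1 ≥ st.2 then count + 1 else count
    loopA c st.1 st.2 count' rest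

def count_balanced_terrain_subsections (terrain : String) : Int :=
  match terrain.toList with
  | [] => 0
  | c :: rest => loopA c 0 1 0 rest

-- ===== PORT B =====
-- pass 1 of Source B: fold building (groups, run, prev)
def rleStep (st : List Int × Int × Option Char) (ch : Char) : List Int × Int × Option Char :=
  if st.2.1 ≠ 0 ∧ st.2.2 = some ch then (st.1, st.2.1 + 1, st.2.2)
  else ((if st.2.1 ≠ 0 then st.1 ++ [st.2.1] else st.1), 1, some ch)

def count_balanced_terrain_subsections_alt (terrain : String) : Int :=
  let st := terrain.toList.foldl rleStep ([], 0, none)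
  let groups := if st.2.1 ≠ 0 then st.1 ++ [st.2.1] else st.1
  -- pass 2 of Source B: sum(min(a, b) for a, b in zip(groups, groups[1:]))
  (List.zip groups groups.tail).foldl (fun acc p => acc + min p.1 p.2) 0

-- ===== PRECONDITION & SPEC =====
def Spec_count_balanced_terrain_subsections (terrain : String) (out : Int) : Prop := out = count_balanced_terrain_subsections_alt terrain
instance (terrain : String) (out : Int) : Decidable (Spec_count_balanced_terrain_subsections terrain out) := by unfold Spec_count_balanced_terrain_subsections; infer_instance

-- ===== CLAIM (what is proved, stated in full; the proofs are below) =====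
def Claim_equal_count_balanced_terrain_subsections : Prop := ∀ (terrain : String), Dom_count_balanced_terrain_subsections terrain → Spec_count_balanced_terrain_subsections terrain (count_balanced_terrain_subsections terrain)

-- ===== LEMMAS AND PROOFS =====

-- reference run-length encoding: run lengths of p⁺rest where the current run already has length n
def goRuns (c : Char) (n : Int) : List Char → List Int
  | [] => [n]
  | d :: rest => if d == c then goRuns d (n + 1) rest else n :: goRuns d 1 rest

-- tailSum a [b₁, b₂, …] = min a b₁ + min b₁ b₂ + …
def tailSum : Int → List Int → Int
  | _, [] => 0
  | a, b :: t => min a b + tailSum b t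

theorem goRuns_head : ∀ (rest : List Char) (c : Char) (n : Int),
    ∃ r t, goRuns c n rest = r :: t ∧ n ≤ r := by
  intro rest
  induction rest with
  | nil => intro c n; exact ⟨n, [], rfl, le_refl n⟩
  | cons d rest ih =>
    intro c n
    by_cases h : d == c
    · obtain ⟨r, t, hg, hr⟩ := ih d (n + 1)
      exact ⟨r, t, by simp [goRuns, h, hg], by omega⟩
    · exact ⟨n, goRuns d 1 rest, by simp [goRuns, h], le_refl n⟩

theorem loopA_eq : ∀ (rest : List Char) (p : Char) (prevg currg count : Int), 1 ≤ currg →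
    loopA p prevg currg count rest = count - min prevg currg + tailSum prevg (goRuns p currg rest) := by
  intro rest
  induction rest with
  | nil => intro p prevg currg count _; simp [loopA, goRuns, tailSum]
  | cons c rest ih =>
    intro p prevg currg count hc
    by_cases h : c == p
    · have hcp : c = p := by simpa using h
      rw [show loopA p prevg currg count (c :: rest)
            = loopA c prevg (currg + 1) (if prevg ≥ currg + 1 then count + 1 else count) rest by
          simp [loopA, h]]
      rw [ih c prevg (currg + 1) _ (by omega)]
      rw [show goRuns p currg (c :: rest) = goRuns c (currg + 1) rest by simp [goRuns, h]]
      split_ifs <;> omega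
    · rw [show loopA p prevg currg count (c :: rest)
            = loopA c currg 1 (if currg ≥ 1 then count + 1 else count) rest by
          simp [loopA, h]]
      rw [ih c currg 1 _ (by omega)]
      rw [show goRuns p currg (c :: rest) = currg :: goRuns c 1 rest by simp [goRuns, h]]
      rw [show tailSum prevg (currg :: goRuns c 1 rest)
            = min prevg currg + tailSum currg (goRuns c 1 rest) from rfl]
      split_ifs <;> omega

theorem rle_loop : ∀ (t : List Char) (p : Char) (n : Int) (groups : List Int), 1 ≤ n →
    (if (List.foldl rleStep (groups, n, some p) t).2.1 ≠ 0
     then (List.foldl rleStep (groups, n, some p) t).1 ++ [(List.foldl rleStep (groups, n, some p) t).2.1]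
     else (List.foldl rleStep (groups, n, some p) t).1) = groups ++ goRuns p n t := by
  intro t
  induction t with
  | nil =>
    intro p n groups hn
    simp [goRuns, show n ≠ 0 by omega]
  | cons c t ih =>
    intro p n groups hn
    by_cases h : c == p
    · have hcp : c = p := by simpa using h
      have hstep : rleStep (groups, n, some p) c = (groups, n + 1, some p) := by
        simp [rleStep, hcp, show n ≠ 0 by omega]
      rw [List.foldl_cons, hstep, ih p (n + 1) groups (by omega)]
      rw [show goRuns p n (c :: t) = goRuns c (n + 1) t by simp [goRuns, h], hcp]
    · have hcp : ¬ (some p = some c) := by simp; intro hq; exact absurd (by simp [hq]) h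
      have hstep : rleStep (groups, n, some p) c = (groups ++ [n], 1, some c) := by
        simp [rleStep, hcp, show n ≠ 0 by omega]
      rw [List.foldl_cons, hstep, ih c 1 (groups ++ [n]) (by omega)]
      rw [show goRuns p n (c :: t) = n :: goRuns c 1 t by simp [goRuns, h]]
      simp

theorem pairfold : ∀ (g : List Int) (a acc : Int),
    List.foldl (fun acc p => acc + min p.1 p.2) acc (List.zip (a :: g) g) = acc + tailSum a g := by
  intro g
  induction g with
  | nil => intro a acc; simp [tailSum]
  | cons b t ih =>
    intro a acc
    rw [show List.zip (a :: b :: t) (b :: t) = (a, b) :: List.zip (b :: t) t from rfl]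
    rw [List.foldl_cons, ih b (acc + min a b)]
    simp [tailSum]; omega

-- ===== VERDICT (by name: the statement is the Claim_ definition above) =====
theorem count_balanced_terrain_subsections_spec : Claim_equal_count_balanced_terrain_subsections := by
  intro terrain _
  unfold Spec_count_balanced_terrain_subsections
  cases hl : terrain.toList with
  | nil =>
    simp only [count_balanced_terrain_subsections, count_balanced_terrain_subsections_alt, hl]
    simp
  | cons c rest =>
    have hstep : rleStep (([] : List Int), (0 : Int), (none : Option Char)) c
        = ([], 1, some c) := by simp [rleStep]
    obtain ⟨r, t, hg, hr⟩ := goRuns_head rest c 1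
    have hrle := rle_loop rest c 1 [] (by omega)
    simp only [List.nil_append, hg] at hrle
    simp only [count_balanced_terrain_subsections, count_balanced_terrain_subsections_alt, hl,
      List.foldl_cons, hstep]
    rw [loopA_eq rest c 0 1 0 (by omega), hg, hrle]
    simp only [List.tail_cons]
    rw [pairfold t r 0]
    rw [show tailSum 0 (r :: t) = min 0 r + tailSum r t from rfl]
    omega
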